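-- pv_equiv track=rewrite | github.com/jonathonreilly/toy-physics | scripts/frontier_s3_general_r.py | classify_vertices
-- ===== SOURCE A (Python) =====
-- def classify_vertices(sites: set) -> tuple[set, set]:
--     """Interior vs boundary vertices."""
--     interior, boundary = set(), set()
--     for v in sites:
--         x, y, z = v
--         is_int = all(
--             (x + dx, y + dy, z + dz) in sites
--             for dx in (-1, 0, 1) for dy in (-1, 0, 1) for dz in (-1, 0, 1)
--             if not (dx == 0 and dy == 0 and dz == 0)
--         )
--         (interior if is_int else boundary).add(v)
--     return interior, boundary
-- ===== SOURCE B (Python) =====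
-- def classify_vertices(sites: set) -> tuple[set, set]:
--     """Interior vs boundary vertices, via set algebra over the 26 neighbor offsets."""
--     offsets = [(dx, dy, dz)
--                for dx in (-1, 0, 1) for dy in (-1, 0, 1) for dz in (-1, 0, 1)
--                if (dx, dy, dz) != (0, 0, 0)]
--     interior = set(sites)
--     for dx, dy, dz in offsets:
--         interior &= {(x - dx, y - dy, z - dz) for (x, y, z) in sites}
--     boundary = set(sites) - interior
--     return interior, boundary
-- ===== Notes on version B (the rewrite author's own statement) =====
-- stated objective: alternative
-- what changed: Instead of scanning the 26-neighborhood of each vertex, B iterates over the 26 offsets and intersects the site set with its back-translated copies (interior = sites ∩ⱼ shift(sites)), then takes boundary = sites - interior.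
import Mathlib
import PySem

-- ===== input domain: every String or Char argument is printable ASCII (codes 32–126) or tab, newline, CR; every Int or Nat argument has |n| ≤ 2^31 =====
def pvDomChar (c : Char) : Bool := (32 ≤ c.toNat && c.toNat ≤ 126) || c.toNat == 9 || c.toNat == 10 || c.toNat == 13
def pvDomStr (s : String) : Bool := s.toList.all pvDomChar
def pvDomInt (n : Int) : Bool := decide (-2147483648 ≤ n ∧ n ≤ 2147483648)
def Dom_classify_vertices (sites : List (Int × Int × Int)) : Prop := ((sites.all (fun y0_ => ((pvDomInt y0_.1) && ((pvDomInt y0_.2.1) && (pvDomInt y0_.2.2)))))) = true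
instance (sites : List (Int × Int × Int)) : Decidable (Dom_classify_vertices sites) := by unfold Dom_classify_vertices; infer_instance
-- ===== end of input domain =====

-- B classifies by set algebra (intersecting the site set with its 26 back-translations)
-- instead of A's per-vertex neighborhood scan; a genuinely different decomposition of the
-- same cost ("alternative", no speed claim). Return-value equivalence only (sets compared
-- as sets; the ports build both result sets in the input list's order).

-- ===== PORT A =====
def classify_vertices (sites : List (Int × Int × Int)) : (List (Int × Int × Int)) × (List (Int × Int × Int)) :=
  -- for v in sites: unpack x,y,z; is_int = all 26 neighbors in sites; add v to interior/boundary
  sites.foldl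
    (fun (ib : List (Int × Int × Int) × List (Int × Int × Int)) v =>
      let x := v.1; let y := v.2.1; let z := v.2.2
      let is_int :=
        ([-1, 0, 1] : List Int).all (fun dx =>
          ([-1, 0, 1] : List Int).all (fun dy =>
            ([-1, 0, 1] : List Int).all (fun dz =>
              (dx == 0 && dy == 0 && dz == 0) ||
                PySem.Set.contains sites (x + dx, y + dy, z + dz))))
      if is_int then (PySem.Set.add ib.1 v, ib.2) else (ib.1, PySem.Set.add ib.2 v))
    (PySem.Set.empty, PySem.Set.empty)

-- ===== PORT B =====
def classify_vertices_alt (sites : List (Int × Int × Int)) : (List (Int × Int × Int)) × (List (Int × Int × Int)) :=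
  -- offsets = [(dx,dy,dz) for ... if (dx,dy,dz) != (0,0,0)]
  let offsets : List (Int × Int × Int) :=
    ([-1, 0, 1] : List Int).flatMap (fun dx =>
      ([-1, 0, 1] : List Int).flatMap (fun dy =>
        (([-1, 0, 1] : List Int).filter (fun dz => !(dx == 0 && dy == 0 && dz == 0))).map
          (fun dz => (dx, dy, dz))))
  -- interior = set(sites); for d in offsets: interior &= {v - d for v in sites}
  let interior :=
    offsets.foldl
      (fun int d =>
        PySem.Set.inter int
          (PySem.Set.ofList (sites.map (fun v => (v.1 - d.1, v.2.1 - d.2.1, v.2.2 - d.2.2)))))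
      (PySem.Set.ofList sites)
  -- boundary = set(sites) - interior
  let boundary := PySem.Set.diff (PySem.Set.ofList sites) interior
  (interior, boundary)

-- ===== PRECONDITION & SPEC =====
def Spec_classify_vertices (sites : List (Int × Int × Int)) (out : (List (Int × Int × Int)) × (List (Int × Int × Int))) : Prop := out = classify_vertices_alt sites
instance (sites : List (Int × Int × Int)) (out : (List (Int × Int × Int)) × (List (Int × Int × Int))) : Decidable (Spec_classify_vertices sites out) := by unfold Spec_classify_vertices; infer_instance

-- ===== CLAIM (what is proved, stated in full; the proofs are below) =====
def Claim_equal_classify_vertices : Prop := ∀ (sites : List (Int × Int × Int)), Dom_classify_vertices sites → Spec_classify_vertices sites (classify_vertices sites)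

-- ===== LEMMAS AND PROOFS =====

-- A's per-vertex interior test, as a named predicate
def pvIsInt (sites : List (Int × Int × Int)) (v : Int × Int × Int) : Bool :=
  ([-1, 0, 1] : List Int).all (fun dx =>
    ([-1, 0, 1] : List Int).all (fun dy =>
      ([-1, 0, 1] : List Int).all (fun dz =>
        (dx == 0 && dy == 0 && dz == 0) ||
          PySem.Set.contains sites (v.1 + dx, v.2.1 + dy, v.2.2 + dz))))

-- A's loop invariant: classifying l after having seen s
theorem pvFoldA (sites : List (Int × Int × Int)) (l : List (Int × Int × Int)) :
    ∀ s : List (Int × Int × Int),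
      l.foldl
        (fun (ib : List (Int × Int × Int) × List (Int × Int × Int)) v =>
          if pvIsInt sites v then (PySem.Set.add ib.1 v, ib.2) else (ib.1, PySem.Set.add ib.2 v))
        ((PySem.Set.ofList s).filter (pvIsInt sites),
         (PySem.Set.ofList s).filter (fun v => !pvIsInt sites v))
      = ((PySem.Set.ofList (s ++ l)).filter (pvIsInt sites),
         (PySem.Set.ofList (s ++ l)).filter (fun v => !pvIsInt sites v)) := by
  induction l with
  | nil => intro s; simp
  | cons v l ih =>
    intro s
    have hstep :
        (if pvIsInt sites v then
            (PySem.Set.add ((PySem.Set.ofList s).filter (pvIsInt sites)) v,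
             (PySem.Set.ofList s).filter (fun w => !pvIsInt sites w))
          else
            ((PySem.Set.ofList s).filter (pvIsInt sites),
             PySem.Set.add ((PySem.Set.ofList s).filter (fun w => !pvIsInt sites w)) v))
        = ((PySem.Set.ofList (s ++ [v])).filter (pvIsInt sites),
           (PySem.Set.ofList (s ++ [v])).filter (fun w => !pvIsInt sites w)) := by
      rw [PySem.Set.ofList_append_singleton]
      by_cases hv : v ∈ PySem.Set.ofList s
      · rw [PySem.Set.add_of_mem hv]
        by_cases hp : pvIsInt sites v
        · rw [if_pos hp,
            PySem.Set.add_of_mem (by rw [List.mem_filter]; exact ⟨hv, hp⟩)]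
        · rw [if_neg hp,
            PySem.Set.add_of_mem (by rw [List.mem_filter]; exact ⟨hv, by simp [hp]⟩)]
      · rw [PySem.Set.add_of_not_mem hv, List.filter_append, List.filter_append]
        have hnf : ∀ q : (Int × Int × Int) → Bool, v ∉ (PySem.Set.ofList s).filter q := by
          intro q hmem; exact hv (List.mem_of_mem_filter hmem)
        by_cases hp : pvIsInt sites v
        · rw [if_pos hp, PySem.Set.add_of_not_mem (hnf _)]
          simp [hp]
        · rw [if_neg hp, PySem.Set.add_of_not_mem (hnf _)]
          simp [hp]
    calc
      _ = List.foldl _ ((PySem.Set.ofList (s ++ [v])).filter (pvIsInt sites),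
            (PySem.Set.ofList (s ++ [v])).filter (fun w => !pvIsInt sites w)) l := by
            simp only [List.foldl_cons]; rw [← hstep]
      _ = _ := by rw [ih (s ++ [v])]; simp

-- A as a pair of filters over the deduplicated sites
theorem pvA_eq (sites : List (Int × Int × Int)) :
    classify_vertices sites
      = ((PySem.Set.ofList sites).filter (pvIsInt sites),
         (PySem.Set.ofList sites).filter (fun v => !pvIsInt sites v)) := by
  have h := pvFoldA sites sites []
  simpa [classify_vertices, pvIsInt, PySem.Set.empty] using h

-- folding intersections = one filter by the conjunction
theorem pvFoldFilter {α β : Type} (c : β → α → Bool) (ds : List β) :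
    ∀ s : List α,
      ds.foldl (fun int d => int.filter (c d)) s
        = s.filter (fun v => ds.all (fun d => c d v)) := by
  induction ds with
  | nil => intro s; simp
  | cons d ds ih =>
    intro s
    simp only [List.foldl_cons, ih, List.filter_filter, List.all_cons]
    exact List.filter_congr (fun a _ => by rw [Bool.and_comm])

-- the per-offset membership test B uses, rewritten as A's neighbor lookup
theorem pvAtom (sites : List (Int × Int × Int)) (v : Int × Int × Int) (dx dy dz : Int) :
    PySem.Set.contains
      (PySem.Set.ofList (sites.map (fun w => (w.1 - dx, w.2.1 - dy, w.2.2 - dz)))) v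
    = PySem.Set.contains sites (v.1 + dx, v.2.1 + dy, v.2.2 + dz) := by
  obtain ⟨x, y, z⟩ := v
  apply Bool.eq_iff_iff.mpr
  rw [PySem.Set.contains_iff, PySem.Set.contains_iff, PySem.Set.mem_ofList, List.mem_map]
  constructor
  · rintro ⟨⟨a, b, c⟩, hw, he⟩
    simp only [Prod.mk.injEq] at he
    obtain ⟨ha, hb, hc⟩ : a = x + dx ∧ b = y + dy ∧ c = z + dz := by
      refine ⟨by omega, by omega, by omega⟩
    subst ha; subst hb; subst hc
    exact hw
  · intro h
    exact ⟨(x + dx, y + dy, z + dz), h, by simp⟩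

-- pushing 'all' through a filtered inner list
theorem pvAllFilter {α : Type} (cond f : α → Bool) (zs : List α) :
    (zs.filter (fun z => !cond z)).all f = zs.all (fun z => cond z || f z) := by
  induction zs with
  | nil => rfl
  | cons z zs ih =>
    by_cases h : cond z <;> simp [h, ih]

-- B's conjunction over the offsets coincides with A's nested neighborhood test
theorem pvPred_eq (sites : List (Int × Int × Int)) (v : Int × Int × Int) :
    (([-1, 0, 1] : List Int).flatMap (fun dx =>
        ([-1, 0, 1] : List Int).flatMap (fun dy =>
          (([-1, 0, 1] : List Int).filter (fun dz => !(dx == 0 && dy == 0 && dz == 0))).map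
            (fun dz => (dx, dy, dz))))).all
      (fun d =>
        PySem.Set.contains
          (PySem.Set.ofList (sites.map (fun w => (w.1 - d.1, w.2.1 - d.2.1, w.2.2 - d.2.2)))) v)
    = pvIsInt sites v := by
  simp only [List.all_flatMap, List.all_map]
  unfold pvIsInt
  refine List.all_congr rfl (fun dx => ?_)
  refine List.all_congr rfl (fun dy => ?_)
  rw [pvAllFilter]
  refine List.all_congr rfl (fun dz => ?_)
  simp only [Function.comp_apply, pvAtom]

-- B as the same pair of filters
theorem pvB_eq (sites : List (Int × Int × Int)) :
    classify_vertices_alt sites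
      = ((PySem.Set.ofList sites).filter (pvIsInt sites),
         (PySem.Set.ofList sites).filter (fun v => !pvIsInt sites v)) := by
  unfold classify_vertices_alt
  have hinter :
      (fun (int : List (Int × Int × Int)) (d : Int × Int × Int) =>
          PySem.Set.inter int
            (PySem.Set.ofList (sites.map (fun v => (v.1 - d.1, v.2.1 - d.2.1, v.2.2 - d.2.2)))))
        = fun int d => int.filter (fun v =>
            PySem.Set.contains
              (PySem.Set.ofList (sites.map (fun w => (w.1 - d.1, w.2.1 - d.2.1, w.2.2 - d.2.2)))) v) := rfl
  simp only [hinter, pvFoldFilter]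
  have hp : (fun v => (([-1, 0, 1] : List Int).flatMap (fun dx =>
        ([-1, 0, 1] : List Int).flatMap (fun dy =>
          (([-1, 0, 1] : List Int).filter (fun dz => !(dx == 0 && dy == 0 && dz == 0))).map
            (fun dz => (dx, dy, dz))))).all
      (fun d =>
        PySem.Set.contains
          (PySem.Set.ofList (sites.map (fun w => (w.1 - d.1, w.2.1 - d.2.1, w.2.2 - d.2.2)))) v))
      = pvIsInt sites := funext (pvPred_eq sites)
  rw [hp]
  refine Prod.ext rfl ?_
  show PySem.Set.diff _ _ = _
  have hdiff : ∀ (s t : List (Int × Int × Int)),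
      PySem.Set.diff s t = s.filter (fun x => !PySem.Set.contains t x) := fun _ _ => rfl
  rw [hdiff]
  apply List.filter_congr
  intro v hv
  congr 1
  apply Bool.eq_iff_iff.mpr
  rw [PySem.Set.contains_iff, List.mem_filter]
  simp [hv]

-- ===== VERDICT (by name: the statement is the Claim_ definition above) =====
theorem classify_vertices_spec : Claim_equal_classify_vertices := by
  intro sites _
  show classify_vertices sites = classify_vertices_alt sites
  rw [pvA_eq, pvB_eq]
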